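-- pv_equiv track=rewrite | github.com/aluiziorocha/MELINDA | code/Orchestrator.py | MELINDA
-- ===== SOURCE A (Python) =====
-- def MELINDA(fps_demand, nodes):
--     nodes.sort(key=lambda x: x[1], reverse=True)
--     solutions = []
--     k = len(nodes)
--     for pivot in range(k):
--         sum_capacity = nodes[pivot][1]
--         partial_solution = [nodes[pivot]]
--         if sum_capacity >= fps_demand:
--             solutions.append(partial_solution)
--         else:
--             for i in range(pivot + 1, k):
--                 # --- Searching a node with remaining capacity
--                 cap = fps_demand - sum_capacity
--                 try:
--                     index = [x[1] for x in nodes[i:]].index(cap) + i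
--                 except ValueError:
--                     index = None
--                 if index is not None:
--                     sum_capacity += nodes[index][1]
--                     partial_solution.append(nodes[index])
--                     solutions.append(partial_solution)
--                     break
--                 # -----------
--                 cap = sum_capacity + nodes[i][1]
--                 if cap >= fps_demand:
--                     possible_solution = partial_solution.copy()
--                     possible_solution.append(nodes[i])
--                     solutions.append(possible_solution)
--                 else:
--                     sum_capacity += nodes[i][1]
--                     partial_solution.append(nodes[i])
--     return solutions
-- ===== SOURCE B (Python) =====
-- def _bisect_left(a, x, lo):
--     # leftmost index in [lo, len(a)) at which x could be inserted keeping a sorted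
--     hi = len(a)
--     while lo < hi:
--         mid = (lo + hi) // 2
--         if a[mid] < x:
--             lo = mid + 1
--         else:
--             hi = mid
--     return lo
--
--
-- def MELINDA(fps_demand, nodes):
--     # Note: like A, sorts `nodes` in place (same observable mutation).
--     nodes.sort(key=lambda x: x[1], reverse=True)
--     k = len(nodes)
--     neg = [-c for _, c in nodes]  # ascending negated capacities, for binary search
--     solutions = []
--     for pivot in range(k):
--         s = nodes[pivot][1]
--         partial = [nodes[pivot]]
--         if s >= fps_demand:
--             solutions.append(partial)
--             continue
--         # Process the tail in runs: while the accumulated sum s is fixed, the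
--         # indices whose capacity exceeds the missing amount t form a contiguous
--         # block [cur, j0) (capacities are descending).  Binary-search its end j0.
--         # An exact complement (capacity == t) exists in nodes[cur:] iff it sits
--         # at j0, and then A's scan finds it already at step cur and stops; else
--         # every index of the block emits one near-solution in order, and the
--         # first index with capacity < t (j0) is absorbed into the running sum.
--         cur = pivot + 1
--         while cur < k:
--             t = fps_demand - s
--             j0 = _bisect_left(neg, -t, cur)
--             if j0 < k and nodes[j0][1] == t:
--                 solutions.append(partial + [nodes[j0]])
--                 break
--             solutions.extend(partial + [nodes[i]] for i in range(cur, j0))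
--             if j0 == k:
--                 break
--             s += nodes[j0][1]
--             partial.append(nodes[j0])
--             cur = j0 + 1
--     return solutions
-- ===== Notes on version B (the rewrite author's own statement) =====
-- stated objective: faster
-- what changed: A walks the tail index by index, rescanning (and copying) the remaining list at every step to look for an exact complement; B processes the tail in runs: it binary-searches (on the descending capacities) the end j0 of the contiguous block of indices whose capacity exceeds the missing amount, decides the exact-complement case by a single O(1) test at j0, emits the whole run of near-solutions in one bulk step, and absorbs nodes[j0] - the per-step linear rescan disappears.
import Mathlib
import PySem

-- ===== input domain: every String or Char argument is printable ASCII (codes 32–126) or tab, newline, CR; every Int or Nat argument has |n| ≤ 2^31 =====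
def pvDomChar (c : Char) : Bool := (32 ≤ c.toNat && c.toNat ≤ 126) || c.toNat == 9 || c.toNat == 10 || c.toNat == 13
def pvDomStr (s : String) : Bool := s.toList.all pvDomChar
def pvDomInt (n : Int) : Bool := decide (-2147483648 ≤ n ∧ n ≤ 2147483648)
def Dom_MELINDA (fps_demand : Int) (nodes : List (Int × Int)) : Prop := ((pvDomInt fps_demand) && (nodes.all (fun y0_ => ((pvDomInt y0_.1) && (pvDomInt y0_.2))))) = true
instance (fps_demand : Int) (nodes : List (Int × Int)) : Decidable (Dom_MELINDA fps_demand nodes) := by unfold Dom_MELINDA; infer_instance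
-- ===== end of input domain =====

-- B replaces A's index-by-index greedy walk (with a linear rescan of the tail at every
-- step) by run-based processing: binary search finds the end of the block of capacities
-- exceeding the missing amount, the exact-complement case is one O(1) test, the block's
-- near-solutions are emitted in bulk (objective: faster; both programs sort `nodes`
-- in place in Python — the theorems here are about the return value).

-- ===== PORT A =====
-- inner `for i in range(pivot+1, k)` loop of A, with its `break` as an early return
def innerA (fps : Int) (ns : List (Int × Int)) :
    Int → List (Int × Int) → List (List (Int × Int)) → List Int → List (List (Int × Int))
  | _, _, sols, [] => sols
  | s, part, sols, i :: rest =>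
    let cap := fps - s
    match (PySem.List.index? ((PySem.List.slice ns (some i) none).map (fun x => x.2)) cap).map
        (fun j => (j : Int) + i) with
    | some index => sols ++ [part ++ [PySem.List.pyGetD ns index (0, 0)]]   -- found: append and break
    | none =>
      let cap2 := s + (PySem.List.pyGetD ns i (0, 0)).2
      if cap2 ≥ fps then
        innerA fps ns s part (sols ++ [part ++ [PySem.List.pyGetD ns i (0, 0)]]) rest
      else
        innerA fps ns (s + (PySem.List.pyGetD ns i (0, 0)).2)
          (part ++ [PySem.List.pyGetD ns i (0, 0)]) sols rest

def MELINDA (fps_demand : Int) (nodes : List (Int × Int)) : List (List (Int × Int)) :=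
  let ns := PySem.List.sorted nodes (fun x => x.2) true
  let k : Int := ns.length
  (PySem.List.pyRange 0 k 1).foldl (fun sols pivot =>
    let s := (PySem.List.pyGetD ns pivot (0, 0)).2
    let part := [PySem.List.pyGetD ns pivot (0, 0)]
    if s ≥ fps_demand then sols ++ [part]
    else innerA fps_demand ns s part sols (PySem.List.pyRange (pivot + 1) k 1)) []

-- ===== PORT B =====
-- hand port of Source B's `_bisect_left(a, x, lo)` (CPython's loop with a `lo` argument,
-- which PySem.List.bisectLeft does not take); exact: in-range Nat indexing, Nat `/2` = `//2`;
-- the fuel argument (hi - lo at the call) only makes the while loop structurally total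
def bisectFromAux (a : List Int) (x : Int) : Nat → Nat → Nat → Nat
  | 0, lo, _ => lo
  | fuel + 1, lo, hi =>
    if lo < hi then
      let mid := (lo + hi) / 2
      if a.getD mid 0 < x then bisectFromAux a x fuel (mid + 1) hi
      else bisectFromAux a x fuel lo mid
    else lo

def bisectFrom (a : List Int) (x : Int) (lo hi : Nat) : Nat :=
  bisectFromAux a x (hi - lo) lo hi

-- Source B's `while cur < k` phase loop for one pivot (fuel = k - cur at the call:
-- cur strictly increases each iteration, so the loop runs at most that often)
def phaseB (fps : Int) (ns : List (Int × Int)) (neg : List Int) (k : Nat) :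
    Nat → Nat → Int → List (Int × Int) → List (List (Int × Int)) → List (List (Int × Int))
  | 0, _, _, _, sols => sols
  | fuel + 1, cur, s, part, sols =>
    if cur < k then
      let t := fps - s
      let j0 := bisectFrom neg (-t) cur k
      if j0 < k ∧ (ns.getD j0 (0, 0)).2 = t then
        sols ++ [part ++ [ns.getD j0 (0, 0)]]
      else
        let sols' := sols ++ (List.range' cur (j0 - cur)).map (fun i => part ++ [ns.getD i (0, 0)])
        if j0 = k then sols'
        else phaseB fps ns neg k fuel (j0 + 1) (s + (ns.getD j0 (0, 0)).2)
          (part ++ [ns.getD j0 (0, 0)]) sols'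
    else sols

def MELINDA_alt (fps_demand : Int) (nodes : List (Int × Int)) : List (List (Int × Int)) :=
  let ns := PySem.List.sorted nodes (fun x => x.2) true
  let k := ns.length
  let neg := ns.map (fun x => -x.2)
  (List.range k).foldl (fun sols pivot =>
    let s := (ns.getD pivot (0, 0)).2
    if s ≥ fps_demand then sols ++ [[ns.getD pivot (0, 0)]]
    else phaseB fps_demand ns neg k (k - (pivot + 1)) (pivot + 1) s [ns.getD pivot (0, 0)] sols) []

-- ===== PRECONDITION & SPEC =====
def Spec_MELINDA (fps_demand : Int) (nodes : List (Int × Int)) (out : List (List (Int × Int))) : Prop := out = MELINDA_alt fps_demand nodes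
instance (fps_demand : Int) (nodes : List (Int × Int)) (out : List (List (Int × Int))) : Decidable (Spec_MELINDA fps_demand nodes out) := by unfold Spec_MELINDA; infer_instance

-- ===== CLAIM (what is proved, stated in full; the proofs are below) =====
def Claim_equal_MELINDA : Prop := ∀ (fps_demand : Int) (nodes : List (Int × Int)), Dom_MELINDA fps_demand nodes → Spec_MELINDA fps_demand nodes (MELINDA fps_demand nodes)

-- ===== LEMMAS AND PROOFS =====

-- the while loop keeps lo ≤ result ≤ hi (any fuel)
theorem bisectFromAux_bounds (a : List Int) (x : Int) :
    ∀ (fuel lo hi : Nat), lo ≤ hi →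
      lo ≤ bisectFromAux a x fuel lo hi ∧ bisectFromAux a x fuel lo hi ≤ hi := by
  intro fuel
  induction fuel with
  | zero => intro lo hi h; simpa [bisectFromAux] using h
  | succ fuel ih =>
    intro lo hi h
    rw [bisectFromAux]
    by_cases hlt : lo < hi
    · rw [if_pos hlt]
      dsimp only
      by_cases hcmp : a.getD ((lo + hi) / 2) 0 < x
      · rw [if_pos hcmp]
        have := ih ((lo + hi) / 2 + 1) hi (by omega)
        omega
      · rw [if_neg hcmp]
        have := ih lo ((lo + hi) / 2) (by omega)
        omega
    · rw [if_neg hlt]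
      omega

theorem bisectFrom_bounds (a : List Int) (x : Int) (lo hi : Nat) (h : lo ≤ hi) :
    lo ≤ bisectFrom a x lo hi ∧ bisectFrom a x lo hi ≤ hi :=
  bisectFromAux_bounds a x (hi - lo) lo hi h

-- correctness on an ascending list, given enough fuel: everything left of the result
-- is < x, everything from the result up to hi is ≥ x
theorem bisectFromAux_spec (a : List Int) (x : Int) (hpw : a.Pairwise (· ≤ ·)) :
    ∀ (fuel lo hi : Nat), hi ≤ a.length → lo ≤ hi → hi - lo ≤ fuel →
    (∀ j, lo ≤ j → j < bisectFromAux a x fuel lo hi → a.getD j 0 < x) ∧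
    (∀ j, bisectFromAux a x fuel lo hi ≤ j → j < hi → x ≤ a.getD j 0) := by
  have hpg := List.pairwise_iff_getElem.mp hpw
  intro fuel
  induction fuel with
  | zero =>
    intro lo hi hhi hlh hfuel
    have : lo = hi := by omega
    subst this
    exact ⟨fun j h1 h2 => by simp [bisectFromAux] at h2; omega,
      fun j h1 h2 => by simp [bisectFromAux] at h1; omega⟩
  | succ fuel ih =>
    intro lo hi hhi hlh hfuel
    rw [bisectFromAux]
    by_cases hlt : lo < hi
    · rw [if_pos hlt]
      dsimp only
      by_cases hcmp : a.getD ((lo + hi) / 2) 0 < x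
      · rw [if_pos hcmp]
        obtain ⟨ih1, ih2⟩ := ih ((lo + hi) / 2 + 1) hi hhi (by omega) (by omega)
        refine ⟨?_, ih2⟩
        intro j hj1 hj2
        rcases Nat.lt_or_ge j ((lo + hi) / 2 + 1) with h | h
        · have hjlen : j < a.length := by omega
          have hmlen : (lo + hi) / 2 < a.length := by omega
          rw [List.getD_eq_getElem _ _ hjlen]
          rw [List.getD_eq_getElem _ _ hmlen] at hcmp
          rcases Nat.lt_or_ge j ((lo + hi) / 2) with h2 | h2
          · exact lt_of_le_of_lt (hpg j ((lo + hi) / 2) hjlen hmlen h2) hcmp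
          · have : j = (lo + hi) / 2 := by omega
            subst this; exact hcmp
        · exact ih1 j h hj2
      · rw [if_neg hcmp]
        obtain ⟨ih1, ih2⟩ := ih lo ((lo + hi) / 2) (by omega) (by omega) (by omega)
        refine ⟨ih1, ?_⟩
        intro j hj1 hj2
        rcases Nat.lt_or_ge j ((lo + hi) / 2) with h | h
        · exact ih2 j hj1 h
        · have hjlen : j < a.length := by omega
          have hmlen : (lo + hi) / 2 < a.length := by omega
          rw [not_lt] at hcmp
          rw [List.getD_eq_getElem _ _ hmlen] at hcmp
          rw [List.getD_eq_getElem _ _ hjlen]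
          rcases Nat.lt_or_ge ((lo + hi) / 2) j with h2 | h2
          · exact le_trans hcmp (hpg ((lo + hi) / 2) j hmlen hjlen h2)
          · have : j = (lo + hi) / 2 := by omega
            subst this; exact hcmp
    · rw [if_neg hlt]
      exact ⟨fun j h1 h2 => by omega, fun j h1 h2 => by omega⟩

theorem bisectFrom_spec (a : List Int) (x : Int) (hpw : a.Pairwise (· ≤ ·))
    (lo hi : Nat) (hhi : hi ≤ a.length) (hlh : lo ≤ hi) :
    (∀ j, lo ≤ j → j < bisectFrom a x lo hi → a.getD j 0 < x) ∧
    (∀ j, bisectFrom a x lo hi ≤ j → j < hi → x ≤ a.getD j 0) :=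
  bisectFromAux_spec a x hpw (hi - lo) lo hi hhi hlh (le_refl _)

-- leftmost-occurrence characterisation of Python's list.index on a dropped prefix
theorem index?_drop_eq_some (xs : List Int) (m n : Nat) (c : Int)
    (hm : n ≤ m) (hlt : m < xs.length) (hc : xs.getD m 0 = c)
    (hfirst : ∀ j, n ≤ j → j < m → xs.getD j 0 ≠ c) :
    PySem.List.index? (xs.drop n) c = some (m - n) := by
  rw [PySem.List.index?_eq_some_iff]
  refine ⟨(xs.drop n).take (m - n), xs.drop (m + 1), ?_, ?_, ?_⟩
  · conv_lhs => rw [← List.take_append_drop (m - n) (xs.drop n)]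
    congr 1
    rw [List.drop_drop]
    have hnm : n + (m - n) = m := by omega
    rw [hnm]
    rw [List.drop_eq_getElem_cons hlt]
    congr 1
    rw [List.getD_eq_getElem _ _ hlt] at hc
    exact hc
  · rw [List.length_take, List.length_drop]
    omega
  · intro hmem
    obtain ⟨j, hj, hval⟩ := List.mem_iff_getElem.mp hmem
    have hjlen : j < m - n := by
      have := hj
      simp only [List.length_take, List.length_drop] at this
      omega
    rw [List.getElem_take, List.getElem_drop] at hval
    have := hfirst (n + j) (by omega) (by omega)
    rw [List.getD_eq_getElem _ _ (by omega)] at this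
    exact this hval

theorem index?_drop_eq_none (xs : List Int) (n : Nat) (c : Int)
    (h : ∀ j, n ≤ j → j < xs.length → xs.getD j 0 ≠ c) :
    PySem.List.index? (xs.drop n) c = none := by
  rw [PySem.List.index?_eq_none_iff]
  intro hmem
  obtain ⟨j, hj, hval⟩ := List.mem_iff_getElem.mp hmem
  rw [List.getElem_drop] at hval
  have hjl : n + j < xs.length := by
    have := hj; rw [List.length_drop] at this; omega
  have := h (n + j) (by omega) hjl
  rw [List.getD_eq_getElem _ _ hjl] at this
  exact this hval

-- the run: while every capacity in [i, i+m) exceeds the missing amount and no exact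
-- complement exists anywhere in the tail, A emits one near-solution per index
theorem runA_eq (fps : Int) (ns : List (Int × Int)) (s : Int) (part : List (Int × Int))
    (m : Nat) :
    ∀ (i : Nat) (sols : List (List (Int × Int))), i + m ≤ ns.length →
    (∀ j, i ≤ j → j < i + m → fps - s < ((ns.map (fun x => x.2)).getD j 0)) →
    (∀ j, i ≤ j → j < ns.length → ((ns.map (fun x => x.2)).getD j 0) ≠ fps - s) →
    innerA fps ns s part sols (PySem.List.pyRange (i : Int) (ns.length : Int) 1) =
      innerA fps ns s part
        (sols ++ (List.range' i m).map (fun j => part ++ [ns.getD j (0, 0)]))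
        (PySem.List.pyRange ((i + m : Nat) : Int) (ns.length : Int) 1) := by
  induction m with
  | zero =>
    intro i sols _ _ _
    simp
  | succ m ih =>
    intro i sols hlen hrun hnone
    have hilt : i < ns.length := by omega
    have hcast : ((i : Nat) : Int) < ((ns.length : Nat) : Int) := by exact_mod_cast hilt
    rw [PySem.List.pyRange_one_cons hcast, innerA]
    have hsearch : PySem.List.index?
        ((PySem.List.slice ns (some ((i : Nat) : Int)) none).map (fun x => x.2)) (fps - s)
        = none := by
      rw [PySem.List.slice_from_natCast, List.map_drop]
      exact index?_drop_eq_none _ i _ (by simpa using hnone)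
    rw [hsearch]
    have hcapi : (ns.map (fun x => x.2)).getD i 0 = (ns.getD i (0, 0)).2 := by
      rw [List.getD_eq_getElem _ _ (by simpa using hilt), List.getD_eq_getElem _ _ hilt]
      simp
    have hgi : fps - s < (ns.getD i (0, 0)).2 := by
      rw [← hcapi]; exact hrun i (le_refl i) (by omega)
    simp only [PySem.List.pyGetD_natCast]
    rw [if_pos (by omega)]
    have hstep : ((i : Nat) : Int) + 1 = ((i + 1 : Nat) : Int) := by push_cast; ring
    rw [hstep, ih (i + 1) (sols ++ [part ++ [ns.getD i (0, 0)]]) (by omega)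
      (fun j h1 h2 => hrun j (by omega) (by omega))
      (fun j h1 h2 => hnone j (by omega) h2)]
    have harr : (i + 1) + m = i + (m + 1) := by omega
    rw [harr, List.range'_succ, List.map_cons, List.append_assoc]
    rfl

-- one phase step of B computes what A's element-wise walk computes on the same tail
theorem phase_eq (fps : Int) (ns : List (Int × Int))
    (hpw : (ns.map (fun x => x.2)).Pairwise (fun a b => b ≤ a)) :
    ∀ (d cur : Nat) (s : Int) (part : List (Int × Int)) (sols : List (List (Int × Int))),
      ns.length - cur ≤ d →
      innerA fps ns s part sols (PySem.List.pyRange (cur : Int) (ns.length : Int) 1) =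
        phaseB fps ns (ns.map (fun x => -x.2)) ns.length d cur s part sols := by
  have hcap : ∀ j, j < ns.length → (ns.map (fun x => x.2)).getD j 0 = (ns.getD j (0, 0)).2 := by
    intro j hj
    rw [List.getD_eq_getElem _ _ (by simpa using hj), List.getD_eq_getElem _ _ hj]
    simp
  have hnegv : ∀ j, j < ns.length →
      (ns.map (fun x => -x.2)).getD j 0 = -((ns.map (fun x => x.2)).getD j 0) := by
    intro j hj
    rw [List.getD_eq_getElem _ _ (by simpa using hj), List.getD_eq_getElem _ _ (by simpa using hj)]
    simp
  have hpg := List.pairwise_iff_getElem.mp hpw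
  have hnpw : (ns.map (fun x => -x.2)).Pairwise (· ≤ ·) := by
    rw [List.pairwise_map]
    rw [List.pairwise_map] at hpw
    exact hpw.imp (fun h => by omega)
  intro d
  induction d with
  | zero =>
    intro cur s part sols hd
    rw [PySem.List.pyRange_one_eq_nil (by exact_mod_cast (by omega : ns.length ≤ cur)),
      phaseB]
    rfl
  | succ d ih =>
    intro cur s part sols hd
    by_cases hcur : cur < ns.length
    · have hbd := bisectFrom_bounds (ns.map (fun x => -x.2)) (-(fps - s)) cur ns.length
        (le_of_lt hcur)
      have hspec := bisectFrom_spec (ns.map (fun x => -x.2)) (-(fps - s)) hnpw cur ns.length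
        (by simp) (le_of_lt hcur)
      set j0 := bisectFrom (ns.map (fun x => -x.2)) (-(fps - s)) cur ns.length with hj0
      have hlt : ∀ j, cur ≤ j → j < j0 → fps - s < (ns.map (fun x => x.2)).getD j 0 := by
        intro j h1 h2
        have := hspec.1 j h1 h2
        rw [hnegv j (by omega)] at this
        omega
      have hge : ∀ j, j0 ≤ j → j < ns.length → (ns.map (fun x => x.2)).getD j 0 ≤ fps - s := by
        intro j h1 h2
        have := hspec.2 j h1 h2
        rw [hnegv j h2] at this
        omega
      rw [phaseB, if_pos hcur]
      simp only [← hj0]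
      by_cases hex : j0 < ns.length ∧ (ns.getD j0 (0, 0)).2 = fps - s
      · rw [if_pos hex]
        rw [PySem.List.pyRange_one_cons (by exact_mod_cast hcur), innerA]
        have hsearch : PySem.List.index?
            ((PySem.List.slice ns (some ((cur : Nat) : Int)) none).map (fun x => x.2)) (fps - s)
            = some (j0 - cur) := by
          rw [PySem.List.slice_from_natCast, List.map_drop]
          exact index?_drop_eq_some _ j0 cur _ hbd.1 (by simpa using hex.1)
            (by rw [hcap j0 hex.1]; exact hex.2)
            (fun j h1 h2 => ne_of_gt (hlt j h1 h2))
        rw [hsearch]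
        have he : ((j0 - cur : Nat) : Int) + ((cur : Nat) : Int) = ((j0 : Nat) : Int) := by
          omega
        show sols ++ [part ++ [PySem.List.pyGetD ns (((j0 - cur : Nat) : Int) + ((cur : Nat) : Int)) (0, 0)]] = _
        rw [he, PySem.List.pyGetD_natCast]
      · rw [if_neg hex]
        rw [not_and_or] at hex
        have hnonocc : ∀ j, cur ≤ j → j < ns.length →
            (ns.map (fun x => x.2)).getD j 0 ≠ fps - s := by
          intro j h1 h2 heq
          rcases Nat.lt_or_ge j j0 with h | h
          · exact absurd heq (ne_of_gt (hlt j h1 h))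
          · have hj0k : j0 < ns.length := by omega
            have hne : (ns.getD j0 (0, 0)).2 ≠ fps - s := by
              rcases hex with h' | h'
              · exact absurd hj0k h'
              · exact h'
            rw [← hcap j0 hj0k] at hne
            have hcap0lt : (ns.map (fun x => x.2)).getD j0 0 < fps - s :=
              lt_of_le_of_ne (hge j0 (le_refl _) hj0k) hne
            rcases Nat.lt_or_ge j0 j with h2' | h2'
            · have hlen1 : j0 < (ns.map (fun x => x.2)).length := by simpa using hj0k
              have hlen2 : j < (ns.map (fun x => x.2)).length := by simpa using h2
              have hmono := hpg j0 j hlen1 hlen2 h2'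
              rw [List.getD_eq_getElem _ _ hlen2] at heq
              rw [List.getD_eq_getElem _ _ hlen1] at hcap0lt
              omega
            · have : j = j0 := by omega
              subst this
              exact absurd heq (by omega)
        have hcj : cur + (j0 - cur) = j0 := by omega
        rw [runA_eq fps ns s part (j0 - cur) cur sols (by omega)
          (fun j h1 h2 => hlt j h1 (by omega)) hnonocc, hcj]
        by_cases hjk : j0 = ns.length
        · rw [if_pos hjk, hjk, PySem.List.pyRange_one_eq_nil (le_refl _)]
          rfl
        · rw [if_neg hjk]
          have hj0lt : j0 < ns.length := lt_of_le_of_ne hbd.2 hjk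
          rw [PySem.List.pyRange_one_cons (by exact_mod_cast hj0lt), innerA]
          have hsearch2 : PySem.List.index?
              ((PySem.List.slice ns (some ((j0 : Nat) : Int)) none).map (fun x => x.2)) (fps - s)
              = none := by
            rw [PySem.List.slice_from_natCast, List.map_drop]
            exact index?_drop_eq_none _ j0 _
              (fun j h1 h2 => hnonocc j (le_trans hbd.1 h1) (by simpa using h2))
          rw [hsearch2]
          simp only [PySem.List.pyGetD_natCast]
          have hcapj0 : (ns.getD j0 (0, 0)).2 < fps - s := by
            rw [← hcap j0 hj0lt]
            apply lt_of_le_of_ne (hge j0 (le_refl _) hj0lt)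
            intro heq
            exact hnonocc j0 hbd.1 hj0lt heq
          rw [if_neg (by omega)]
          have hstep : ((j0 : Nat) : Int) + 1 = ((j0 + 1 : Nat) : Int) := by push_cast; ring
          rw [hstep, ih (j0 + 1) (s + (ns.getD j0 (0, 0)).2) (part ++ [ns.getD j0 (0, 0)]) _
            (by omega)]
          rfl
    · rw [PySem.List.pyRange_one_eq_nil (by exact_mod_cast (by omega : ns.length ≤ cur)),
        phaseB, if_neg hcur]
      rfl

-- ===== VERDICT (by name: the statement is the Claim_ definition above) =====
theorem MELINDA_spec : Claim_equal_MELINDA := by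
  intro fps nodes _dom
  unfold Spec_MELINDA MELINDA MELINDA_alt
  dsimp only
  have hpw : ((PySem.List.sorted nodes (fun x => x.2) true).map (fun x => x.2)).Pairwise
      (fun a b => b ≤ a) := by
    rw [List.pairwise_map]
    exact PySem.List.sorted_pairwise_rev nodes (fun x => x.2)
  set ns := PySem.List.sorted nodes (fun x => x.2) true with hns
  rw [PySem.List.pyRange_zero_natCast, List.foldl_map]
  apply PySem.List.foldl_congr_mem
  intro sols pivot hp
  have hplt : pivot < ns.length := List.mem_range.mp hp
  rw [PySem.List.pyGetD_natCast]
  by_cases hs : (ns.getD pivot (0, 0)).2 ≥ fps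
  · rw [if_pos hs, if_pos hs]
  · rw [if_neg hs, if_neg hs]
    have : ((pivot : Int) + 1) = ((pivot + 1 : Nat) : Int) := by push_cast; ring
    rw [this]
    exact phase_eq fps ns hpw (ns.length - (pivot + 1)) (pivot + 1) _ _ sols (le_refl _)
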